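-- pv_equiv track=rewrite | github.com/hnezado/Katas_Python | 7 kyu/comfortable_words.py | comfortable_word
-- ===== SOURCE A (Python) =====
-- def comfortable_word(word):
--   left_letters = 'qwertasdfgzxcvb'
--   right_letters = 'yuiophjklnm'
--   hand = ''
--   for c in word:
--     if c in left_letters:
--       if hand == 'left': return False
--       else: hand = 'left'
--     elif c in right_letters:
--       if hand == 'right': return False
--       else: hand = 'right'
--   return True
-- ===== SOURCE B (Python) =====
-- def comfortable_word(word):
--     left_letters = 'qwertasdfgzxcvb'
--     right_letters = 'yuiophjklnm'
--     seq = ['L' if c in left_letters else 'R' for c in word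
--            if c in left_letters or c in right_letters]
--     return all(a != b for a, b in zip(seq, seq[1:]))
-- ===== Notes on version B (the rewrite author's own statement) =====
-- stated objective: alternative
-- what changed: B maps the word to a filtered sequence of hand labels and then checks that no two adjacent labels are equal, instead of A's stateful single-pass loop with early returns.
import Mathlib
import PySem

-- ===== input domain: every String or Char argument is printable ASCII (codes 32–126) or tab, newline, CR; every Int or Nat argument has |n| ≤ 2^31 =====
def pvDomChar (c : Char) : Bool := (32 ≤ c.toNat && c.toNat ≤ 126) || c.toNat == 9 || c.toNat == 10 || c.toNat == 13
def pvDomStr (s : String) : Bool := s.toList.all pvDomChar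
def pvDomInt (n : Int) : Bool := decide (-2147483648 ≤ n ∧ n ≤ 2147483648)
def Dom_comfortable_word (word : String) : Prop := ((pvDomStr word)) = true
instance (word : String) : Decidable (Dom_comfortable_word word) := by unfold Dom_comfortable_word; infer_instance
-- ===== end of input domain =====

-- B replaces A's stateful early-return loop by a filter-to-hand-labels map followed by an
-- adjacent-pairs comparison; objective: alternative decomposition (same cost).

-- ===== PORT A =====
def pvLeftLetters : List Char := "qwertasdfgzxcvb".toList
def pvRightLetters : List Char := "yuiophjklnm".toList

-- A's loop: state 'hand' is the string "", "left" or "right"; early 'return False' becomes false.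
def pvALoop : List Char → String → Bool
  | [], _ => true
  | c :: rest, hand =>
    if pvLeftLetters.contains c then
      (if hand == "left" then false else pvALoop rest "left")
    else if pvRightLetters.contains c then
      (if hand == "right" then false else pvALoop rest "right")
    else pvALoop rest hand

def comfortable_word (word : String) : Bool := pvALoop word.toList ""

-- ===== PORT B =====
-- the comprehension: label 'L'/'R' for hand letters, others dropped
def pvLabels (cs : List Char) : List Char :=
  (cs.filter (fun c => pvLeftLetters.contains c || pvRightLetters.contains c)).map
    (fun c => if pvLeftLetters.contains c then 'L' else 'R')

-- all(a != b for a, b in zip(seq, seq[1:]))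
def comfortable_word_alt (word : String) : Bool :=
  let seq := pvLabels word.toList
  ((seq.zip seq.tail).all (fun p => p.1 != p.2))

-- ===== PRECONDITION & SPEC =====
def Spec_comfortable_word (word : String) (out : Bool) : Prop := out = comfortable_word_alt word
instance (word : String) (out : Bool) : Decidable (Spec_comfortable_word word out) := by unfold Spec_comfortable_word; infer_instance

-- ===== CLAIM (what is proved, stated in full; the proofs are below) =====
def Claim_equal_comfortable_word : Prop := ∀ (word : String), Dom_comfortable_word word → Spec_comfortable_word word (comfortable_word word)

-- ===== LEMMAS AND PROOFS =====

-- neighbor check with an optional previous label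
def pvNoAdj : Option Char → List Char → Bool
  | _, [] => true
  | none, l :: rest => pvNoAdj (some l) rest
  | some p, l :: rest => (p != l) && pvNoAdj (some l) rest

theorem pvNoAdj_some (ls : List Char) (a : Char) :
    pvNoAdj (some a) ls = (((a :: ls).zip ls).all (fun q => q.1 != q.2)) := by
  induction ls generalizing a with
  | nil => simp [pvNoAdj]
  | cons l rest ih => simp [pvNoAdj, ih l, List.all_cons]

theorem pvNoAdj_none (ls : List Char) :
    pvNoAdj none ls = ((ls.zip ls.tail).all (fun q => q.1 != q.2)) := by
  cases ls with
  | nil => simp [pvNoAdj]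
  | cons l rest => simp [pvNoAdj, pvNoAdj_some]

def pvHandLabel (hand : String) : Option Char :=
  if hand == "left" then some 'L' else if hand == "right" then some 'R' else none

theorem pvALoop_eq (cs : List Char) (hand : String)
    (h : hand = "" ∨ hand = "left" ∨ hand = "right") :
    pvALoop cs hand = pvNoAdj (pvHandLabel hand) (pvLabels cs) := by
  induction cs generalizing hand with
  | nil => simp [pvALoop, pvLabels, pvNoAdj]
  | cons c rest ih =>
    by_cases hl : c ∈ pvLeftLetters
    · rcases h with h | h | h <;> subst h <;>
        simp [pvALoop, pvLabels, hl, ih "left" (by simp), pvNoAdj, pvHandLabel]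
    · by_cases hr : c ∈ pvRightLetters
      · rcases h with h | h | h <;> subst h <;>
          simp [pvALoop, pvLabels, hl, hr, ih "right" (by simp), pvNoAdj, pvHandLabel]
      · have hlab : pvLabels (c :: rest) = pvLabels rest := by
          simp [pvLabels, hl, hr]
        simp [pvALoop, hl, hr, hlab, ih hand h]

-- ===== VERDICT (by name: the statement is the Claim_ definition above) =====
theorem comfortable_word_spec : Claim_equal_comfortable_word := by
  intro word _
  unfold Spec_comfortable_word comfortable_word comfortable_word_alt
  rw [pvALoop_eq word.toList "" (Or.inl rfl)]
  simpa [pvHandLabel] using pvNoAdj_none (pvLabels word.toList)
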